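-- pv_equiv track=rewrite | github.com/GoharAyan/Inst_Sem | Python/norepeat_sum.py | list_tuple
-- ===== SOURCE A (Python) =====
-- def list_tuple(lis, tup):
--
--     result = lis
--     for i in tup[:]:
--         if i not in result:
--             result.append(i)
--         else:
--             result.remove(i)
--
--     return sum(result)
-- ===== SOURCE B (Python) =====
-- def list_tuple(lis, tup):
--     cl = {}
--     for x in lis:
--         cl[x] = cl.get(x, 0) + 1
--     ct = {}
--     for x in tup:
--         ct[x] = ct.get(x, 0) + 1
--     total = 0
--     for v, c in cl.items():
--         k = ct.get(v, 0)
--         total += v * (c - k if k <= c else (k - c) % 2)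
--     for v, k in ct.items():
--         if v not in cl:
--             total += v * (k % 2)
--     return total
-- ===== Notes on version B (the rewrite author's own statement) =====
-- stated objective: faster
-- what changed: Instead of simulating A's per-element toggle loop, B counts occurrences of each value in lis and tup once and applies a per-value closed form (final multiplicity of v is c-k if k<=c else (k-c)%2, since toggles of different values are independent), summing v*multiplicity; A also mutates lis in place while B does not (return-value equivalence only).
import Mathlib
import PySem

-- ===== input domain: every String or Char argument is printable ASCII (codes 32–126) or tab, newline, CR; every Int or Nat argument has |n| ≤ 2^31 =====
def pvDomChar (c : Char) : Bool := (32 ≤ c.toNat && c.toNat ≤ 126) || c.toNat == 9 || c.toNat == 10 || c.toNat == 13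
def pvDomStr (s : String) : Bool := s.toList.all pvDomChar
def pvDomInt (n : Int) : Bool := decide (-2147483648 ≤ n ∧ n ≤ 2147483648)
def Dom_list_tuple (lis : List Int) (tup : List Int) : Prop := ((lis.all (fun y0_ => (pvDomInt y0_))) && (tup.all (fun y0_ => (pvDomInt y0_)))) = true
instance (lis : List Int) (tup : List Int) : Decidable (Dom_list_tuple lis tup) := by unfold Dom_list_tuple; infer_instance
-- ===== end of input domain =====

-- B replaces A's per-element toggle simulation by a per-value closed form: final multiplicity
-- of v is c-k if k ≤ c else (k-c)%2 (toggles of distinct values are independent), computed from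
-- two occurrence counts, O(m+n) vs A's O(m*n); A mutates lis in place, B does not — the
-- equivalence proved here is about the return value only.


-- ===== PORT A =====
-- A's loop body: toggle i in/out of result (remove? = list.remove, first occurrence)
def stepA (res : List Int) (i : Int) : List Int :=
  if ¬ (i ∈ res) then res ++ [i]
  else match PySem.List.remove? res i with
    | some r => r
    | none => res

def list_tuple (lis : List Int) (tup : List Int) : Int :=
  let result := tup.foldl stepA lis
  result.sum

-- ===== PORT B =====
def list_tuple_alt (lis : List Int) (tup : List Int) : Int :=
  let cl := lis.foldl (fun d x => d.insert x (d.getD x 0 + 1)) (PySem.Dict.empty : PySem.Dict Int Int)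
  let ct := tup.foldl (fun d x => d.insert x (d.getD x 0 + 1)) (PySem.Dict.empty : PySem.Dict Int Int)
  let t1 := cl.items.foldl (fun t p =>
      let k := ct.getD p.1 0
      t + p.1 * (if k ≤ p.2 then p.2 - k else PySem.Int.mod (k - p.2) 2)) 0
  ct.items.foldl (fun t p =>
      if cl.contains p.1 then t else t + p.1 * PySem.Int.mod p.2 2) t1

-- ===== PRECONDITION & SPEC =====
def Spec_list_tuple (lis : List Int) (tup : List Int) (out : Int) : Prop := out = list_tuple_alt lis tup
instance (lis : List Int) (tup : List Int) (out : Int) : Decidable (Spec_list_tuple lis tup out) := by unfold Spec_list_tuple; infer_instance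

-- ===== CLAIM (what is proved, stated in full; the proofs are below) =====
def Claim_equal_list_tuple : Prop := ∀ (lis : List Int) (tup : List Int), Dom_list_tuple lis tup → Spec_list_tuple lis tup (list_tuple lis tup)

-- ===== LEMMAS AND PROOFS =====

-- one toggle of a value's multiplicity
def toggleN (c : Nat) : Nat := if 0 < c then c - 1 else c + 1

-- closed form for k toggles starting from multiplicity c
def finalN (c k : Nat) : Nat := if k ≤ c then c - k else (k - c) % 2

lemma count_stepA (res : List Int) (i x : Int) :
    (stepA res i).count x = if x = i then toggleN (res.count i) else res.count x := by
  unfold stepA toggleN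
  by_cases hmem : i ∈ res
  · have hrem : PySem.List.remove? res i = some (res.erase i) :=
      PySem.List.remove?_eq_some_erase res i hmem
    have hpos : 0 < res.count i := List.count_pos_iff.mpr hmem
    simp only [hmem, not_true_eq_false, if_false, hrem]
    by_cases hx : x = i
    · subst hx; simp [List.count_erase_self, hpos]
    · simp [List.count_erase_of_ne hx, hx]
  · have hz : res.count i = 0 := List.count_eq_zero_of_not_mem hmem
    simp only [hmem, not_false_eq_true, if_true]
    by_cases hx : x = i
    · subst hx; simp [List.count_append, hz]
    · simp [List.count_append, hx, List.count_singleton]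
      intro h; exact absurd h.symm hx

lemma count_foldl_stepA (tup : List Int) : ∀ (res : List Int) (x : Int),
    (tup.foldl stepA res).count x = toggleN^[tup.count x] (res.count x) := by
  induction tup with
  | nil => intro res x; simp
  | cons i rest ih =>
    intro res x
    rw [List.foldl_cons, ih, count_stepA]
    by_cases hx : x = i
    · subst hx
      simp [List.count_cons_self, Function.iterate_succ_apply]
    · have hix : ¬ i = x := fun e => hx e.symm
      simp [hx, hix]

lemma iterate_toggleN (k : Nat) : ∀ c, toggleN^[k] c = finalN c k := by
  induction k with
  | zero => intro c; simp [finalN]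
  | succ k ih =>
    intro c
    rw [Function.iterate_succ_apply, ih]
    unfold toggleN finalN
    by_cases hc : 0 < c
    · simp only [hc, if_true]; split_ifs <;> omega
    · simp only [hc, if_false]
      have : c = 0 := by omega
      subst this
      split_ifs <;> omega

-- A's final multiplicity of x is the closed form of B
lemma count_result (lis tup : List Int) (x : Int) :
    (tup.foldl stepA lis).count x = finalN (lis.count x) (tup.count x) := by
  rw [count_foldl_stepA, iterate_toggleN]

-- sum of a list from per-value multiplicities over any duplicate-free cover of its values
lemma sum_ite_eq_self {ks : List Int} (hnd : ks.Nodup) {a : Int} (ha : a ∈ ks) :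
    (ks.map (fun v => if v = a then v else 0)).sum = a := by
  induction ks with
  | nil => cases ha
  | cons b bs ih =>
    simp only [List.map_cons, List.sum_cons]
    rcases List.mem_cons.mp ha with h | h
    · subst h
      have hz : ∀ v ∈ bs, (if v = a then v else 0) = 0 := by
        intro v hv
        have : v ≠ a := fun e => (List.nodup_cons.mp hnd).1 (e ▸ hv)
        simp [this]
      rw [if_pos rfl, List.sum_eq_zero (by simpa using hz)]
      ring
    · have hb : b ≠ a := fun e => (List.nodup_cons.mp hnd).1 (e ▸ h)
      rw [if_neg hb, ih (List.nodup_cons.mp hnd).2 h]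
      ring

lemma sum_by_counts (l : List Int) : ∀ (ks : List Int), ks.Nodup → (∀ x ∈ l, x ∈ ks) →
    l.sum = (ks.map (fun v => v * (l.count v : Int))).sum := by
  induction l with
  | nil => intro ks _ _; simp
  | cons a l ih =>
    intro ks hnd hcov
    have ha : a ∈ ks := hcov a (List.mem_cons_self ..)
    have hcov' : ∀ x ∈ l, x ∈ ks := fun x hx => hcov x (List.mem_cons_of_mem _ hx)
    have hsplit : (ks.map (fun v => v * ((a :: l).count v : Int))).sum
        = (ks.map (fun v => v * (l.count v : Int))).sum
          + (ks.map (fun v => if v = a then v else 0)).sum := by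
      rw [← PySem.List.sum_map_add_int]
      apply congrArg
      apply List.map_congr_left
      intro v _
      rw [List.count_cons]
      by_cases hv : v = a
      · subst hv; simp; ring
      · have hab : (a == v) = false := by simp; exact fun e => hv e.symm
        simp [hab, hv]
    rw [List.sum_cons, hsplit, sum_ite_eq_self hnd ha, ih ks hnd hcov']
    ring

-- B's per-value term equals v * finalN over the Int casts
lemma termB_eq (v : Int) (c k : Nat) :
    v * (if (k : Int) ≤ (c : Int) then (c : Int) - k else PySem.Int.mod ((k : Int) - c) 2)
      = v * (finalN c k : Int) := by
  unfold finalN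
  by_cases h : k ≤ c
  · simp only [h, Nat.cast_le.mpr h, if_pos]
    push_cast [Nat.cast_sub h]; ring
  · have h2 : ¬ ((k : Int) ≤ (c : Int)) := by exact_mod_cast h
    simp only [h, if_false, h2]
    have hkc : (k : Int) - c = ((k - c : Nat) : Int) := by omega
    have h3 : PySem.Int.mod (((k - c : Nat)) : Int) 2 = (((k - c) % 2 : Nat) : Int) := by
      exact_mod_cast PySem.Int.mod_natCast (k - c) 2
    rw [hkc, h3]

lemma mod_two_cast (v : Int) (k : Nat) :
    v * PySem.Int.mod (k : Int) 2 = v * ((k % 2 : Nat) : Int) := by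
  have h3 : PySem.Int.mod (k : Int) 2 = ((k % 2 : Nat) : Int) := by
    exact_mod_cast PySem.Int.mod_natCast k 2
  rw [h3]

lemma finalN_zero (k : Nat) : finalN 0 k = k % 2 := by
  unfold finalN; split_ifs <;> omega

-- B's second loop (skip keys already counted in cl) as a sum over the filtered list
lemma foldl_if_add (C : Int × Int → Bool) (g : Int × Int → Int) (l : List (Int × Int)) :
    ∀ t0, l.foldl (fun t p => if C p then t else t + g p) t0
      = t0 + ((l.filter (fun p => !C p)).map g).sum := by
  induction l with
  | nil => intro t0; simp
  | cons p ps ih =>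
    intro t0
    rw [List.foldl_cons]
    by_cases h : C p
    · simp only [h, if_true, List.filter_cons, Bool.not_true, ih]
      simp
    · rw [if_neg h, ih (t0 + g p), List.filter_cons]
      have hb : (!C p) = true := by simp [h]
      rw [hb, if_pos rfl, List.map_cons, List.sum_cons]
      ring

-- ===== VERDICT (by name: the statement is the Claim_ definition above) =====
theorem list_tuple_spec : Claim_equal_list_tuple := by
  intro lis tup _
  unfold Spec_list_tuple
  simp only [list_tuple, list_tuple_alt]
  rw [PySem.Dict.foldl_insert_getD_add_one_eq_counter,
      PySem.Dict.foldl_insert_getD_add_one_eq_counter,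
      foldl_if_add, PySem.List.foldl_add,
      PySem.Dict.items_counter, PySem.Dict.items_counter,
      List.filter_map, List.map_map, List.map_map]
  simp only [Function.comp_def, PySem.Dict.getD_counter, PySem.Dict.contains_counter]
  -- the duplicate-free cover of the result's values
  set P : Int → Bool := fun v => !lis.contains v with hP
  have hDl := PySem.Set.nodup_ofList lis
  have hDt := PySem.Set.nodup_ofList tup
  have hnd : (PySem.Set.ofList lis ++ (PySem.Set.ofList tup).filter P).Nodup := by
    refine List.Nodup.append hDl (hDt.filter P) ?_
    intro a ha hb
    have hmem : a ∈ lis := (PySem.Set.mem_ofList lis a).mp ha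
    have := (List.mem_filter.mp hb).2
    simp [hP, hmem] at this
  have hcov : ∀ x ∈ tup.foldl stepA lis, x ∈ PySem.Set.ofList lis ++ (PySem.Set.ofList tup).filter P := by
    intro x hx
    by_cases hm : x ∈ lis
    · exact List.mem_append_left _ ((PySem.Set.mem_ofList lis x).mpr hm)
    · have hcnt : 0 < (tup.foldl stepA lis).count x := List.count_pos_iff.mpr hx
      rw [count_result] at hcnt
      have hl0 : lis.count x = 0 := List.count_eq_zero_of_not_mem hm
      have ht : x ∈ tup := by
        by_contra hnt
        have h0 : tup.count x = 0 := List.count_eq_zero_of_not_mem hnt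
        rw [hl0, h0] at hcnt
        simp [finalN] at hcnt
      refine List.mem_append_right _ (List.mem_filter.mpr ⟨(PySem.Set.mem_ofList tup x).mpr ht, ?_⟩)
      simp [hP, hm]
  rw [sum_by_counts (tup.foldl stepA lis) _ hnd hcov, List.map_append, List.sum_append]
  simp only [count_result]
  have h1 : ∀ v ∈ PySem.Set.ofList lis,
      v * ((finalN (lis.count v) (tup.count v) : Nat) : Int)
        = v * (if ((tup.count v : Nat) : Int) ≤ ((lis.count v : Nat) : Int)
               then ((lis.count v : Nat) : Int) - ((tup.count v : Nat) : Int)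
               else PySem.Int.mod (((tup.count v : Nat) : Int) - ((lis.count v : Nat) : Int)) 2) := by
    intro v _
    exact (termB_eq v (lis.count v) (tup.count v)).symm
  have h2 : ∀ v ∈ (PySem.Set.ofList tup).filter P,
      v * ((finalN (lis.count v) (tup.count v) : Nat) : Int)
        = v * PySem.Int.mod ((tup.count v : Nat) : Int) 2 := by
    intro v hv
    have hvp := (List.mem_filter.mp hv).2
    have hm : v ∉ lis := by simpa [hP] using hvp
    have hl0 : lis.count v = 0 := List.count_eq_zero_of_not_mem hm
    rw [hl0, finalN_zero]
    exact (mod_two_cast v (tup.count v)).symm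
  rw [List.map_congr_left h1, List.map_congr_left h2]
  ring
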